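-- pv_equiv track=rewrite | github.com/chiaseeeeeds/tcglistingbot-telegram | services/ocr.py | _score_name_window
-- ===== SOURCE A (Python) =====
-- def _score_name_window(tokens: list[str], prefix: str) -> tuple[int, str]:
--     stopwords = {'from', 'evolves', 'pokemon', 'ability', 'when', 'your', 'bench', 'damage', 'prevent', 'opponent', 'this', 'long', 'as', 'play', 'hand', 'turn', 'attach'}
--     best_score = -1
--     best_body = ''
--     for start in range(len(tokens)):
--         for length in range(1, min(4, len(tokens) - start) + 1):
--             window_tokens = tokens[start:start + length]
--             candidate_body = ' '.join(window_tokens)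
--             alpha_count = sum(char.isalpha() for char in candidate_body)
--             stopword_hits = sum(token.lower() in stopwords for token in window_tokens)
--             score = alpha_count * 2 + len(window_tokens) * 12 - stopword_hits * 24
--             if 1 <= len(window_tokens) <= 3:
--                 score += 16
--             if any(len(token) >= 6 for token in window_tokens):
--                 score += 8
--             if any(token.upper() in {'EX', 'GX', 'VMAX', 'VSTAR', 'V'} for token in window_tokens):
--                 score += 18
--             if score > best_score:
--                 best_score = score
--                 best_body = candidate_body
--     return max(best_score, 0), f'{prefix}: {best_body}'.strip() if best_body else ''
-- ===== SOURCE B (Python) =====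
-- def _prefix_sums(xs):
--     out = [0]
--     total = 0
--     for x in xs:
--         total += x
--         out.append(total)
--     return out
--
--
-- def _score_name_window(tokens: list[str], prefix: str) -> tuple[int, str]:
--     stopwords = {'from', 'evolves', 'pokemon', 'ability', 'when', 'your', 'bench', 'damage', 'prevent', 'opponent', 'this', 'long', 'as', 'play', 'hand', 'turn', 'attach'}
--     suffixes = {'EX', 'GX', 'VMAX', 'VSTAR', 'V'}
--     n = len(tokens)
--     # per-token feature table
--     alpha = [sum(c.isalpha() for c in t) for t in tokens]
--     stop = [1 if t.lower() in stopwords else 0 for t in tokens]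
--     long_flag = [1 if len(t) >= 6 else 0 for t in tokens]
--     suffix_flag = [1 if t.upper() in suffixes else 0 for t in tokens]
--     aps = _prefix_sums(alpha)
--     sps = _prefix_sums(stop)
--     lps = _prefix_sums(long_flag)
--     ups = _prefix_sums(suffix_flag)
--     best_score, best_start, best_len = -1, 0, 0
--     for start in range(n):
--         for length in range(1, min(4, n - start) + 1):
--             end = start + length
--             score = (aps[end] - aps[start]) * 2 + length * 12 - (sps[end] - sps[start]) * 24
--             if length <= 3:
--                 score += 16
--             if lps[end] - lps[start] > 0:
--                 score += 8
--             if ups[end] - ups[start] > 0: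
--                 score += 18
--             if score > best_score:
--                 best_score, best_start, best_len = score, start, length
--     body = ' '.join(tokens[best_start:best_start + best_len])
--     return max(best_score, 0), f'{prefix}: {body}'.strip() if body else ''
-- ===== Notes on version B (the rewrite author's own statement) =====
-- stated objective: faster
-- what changed: B precomputes a per-token feature table (alpha count, stopword flag, long flag, suffix flag) with prefix sums and scores each window by four range-sum lookups, tracking the best (start, length) and joining the winning window only once at the end, instead of A's per-window join plus character and token rescans.
import Mathlib
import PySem

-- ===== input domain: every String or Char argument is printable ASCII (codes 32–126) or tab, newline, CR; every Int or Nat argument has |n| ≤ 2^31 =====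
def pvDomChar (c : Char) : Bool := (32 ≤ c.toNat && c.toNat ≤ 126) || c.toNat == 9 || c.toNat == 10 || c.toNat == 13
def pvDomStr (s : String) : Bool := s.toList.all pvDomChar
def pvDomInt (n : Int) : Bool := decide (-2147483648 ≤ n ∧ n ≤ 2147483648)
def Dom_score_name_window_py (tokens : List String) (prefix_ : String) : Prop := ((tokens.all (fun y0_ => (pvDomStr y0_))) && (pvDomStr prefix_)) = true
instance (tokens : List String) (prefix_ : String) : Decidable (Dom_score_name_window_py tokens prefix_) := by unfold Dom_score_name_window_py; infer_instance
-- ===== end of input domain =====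

-- B replaces A's per-window rescanning (join + char scan + token scans for every window) by a
-- per-token feature table with prefix sums, so each window's score is a few range-sum lookups;
-- same iteration order and strict-'>' earliest-window tie-break; measurably faster (constant-factor: no per-window rescans).

-- ===== PORT A =====
def pvStopA : List String := ["from", "evolves", "pokemon", "ability", "when", "your", "bench", "damage", "prevent", "opponent", "this", "long", "as", "play", "hand", "turn", "attach"]
def pvSufA : List String := ["EX", "GX", "VMAX", "VSTAR", "V"]

-- body of A's inner 'for length in range(1, min(4, len(tokens) - start) + 1)' loop
def pvAinner (tokens : List String) (start : Int) (st : Int × String) (length : Int) : Int × String :=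
  let window := PySem.List.slice tokens (some start) (some (start + length))
  let body := PySem.Str.join " " window
  let alphaCount : Int := (body.toList.countP (fun c => PySem.Chars.isalpha c) : Nat)
  let stopHits : Int := (window.countP (fun t => pvStopA.contains (PySem.Str.lower t)) : Nat)
  let score0 := alphaCount * 2 + PySem.List.len window * 12 - stopHits * 24
  let score1 := if 1 ≤ PySem.List.len window ∧ PySem.List.len window ≤ 3 then score0 + 16 else score0
  let score2 := if window.any (fun t => decide (6 ≤ PySem.Str.len t)) then score1 + 8 else score1
  let score3 := if window.any (fun t => pvSufA.contains (PySem.Str.upper t)) then score2 + 18 else score2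
  if st.1 < score3 then (score3, body) else st

def pvAouter (tokens : List String) (st : Int × String) (start : Int) : Int × String :=
  (PySem.List.pyRange 1 (min 4 (PySem.List.len tokens - start) + 1) 1).foldl (pvAinner tokens start) st

-- the f-string 'f"{prefix}: {best_body}"' is ported as the exact concatenation PySem.Str.join "" [...]
def score_name_window_py (tokens : List String) (prefix_ : String) : Int × String :=
  let final := (PySem.List.pyRange 0 (PySem.List.len tokens) 1).foldl (pvAouter tokens) (-1, "")
  (max final.1 0,
   if final.2 ≠ "" then PySem.Str.strip (PySem.Str.join "" [prefix_, ": ", final.2]) else "")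

-- ===== PORT B =====
def pvStopB : List String := ["from", "evolves", "pokemon", "ability", "when", "your", "bench", "damage", "prevent", "opponent", "this", "long", "as", "play", "hand", "turn", "attach"]
def pvSufB : List String := ["EX", "GX", "VMAX", "VSTAR", "V"]

-- Source B's _prefix_sums: running total, out starts as [0]
def pvPrefixSums (xs : List Int) : List Int :=
  (xs.foldl (fun (st : List Int × Int) x => (st.1 ++ [st.2 + x], st.2 + x)) ([0], 0)).1

-- body of B's inner loop: score from range sums of the four prefix-sum tables
def pvBinner (aps sps lps ups : List Int) (start : Int) (st : Int × Int × Int) (length : Int) : Int × Int × Int :=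
  let e := start + length
  let score0 := (PySem.List.pyGetD aps e 0 - PySem.List.pyGetD aps start 0) * 2 + length * 12
                - (PySem.List.pyGetD sps e 0 - PySem.List.pyGetD sps start 0) * 24
  let score1 := if length ≤ 3 then score0 + 16 else score0
  let score2 := if 0 < PySem.List.pyGetD lps e 0 - PySem.List.pyGetD lps start 0 then score1 + 8 else score1
  let score3 := if 0 < PySem.List.pyGetD ups e 0 - PySem.List.pyGetD ups start 0 then score2 + 18 else score2
  if st.1 < score3 then (score3, start, length) else st

def score_name_window_py_alt (tokens : List String) (prefix_ : String) : Int × String :=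
  let n := PySem.List.len tokens
  let alpha := tokens.map (fun t => ((t.toList.countP (fun c => PySem.Chars.isalpha c) : Nat) : Int))
  let stopl := tokens.map (fun t => if pvStopB.contains (PySem.Str.lower t) then (1 : Int) else 0)
  let lngl := tokens.map (fun t => if 6 ≤ PySem.Str.len t then (1 : Int) else 0)
  let sufl := tokens.map (fun t => if pvSufB.contains (PySem.Str.upper t) then (1 : Int) else 0)
  let aps := pvPrefixSums alpha
  let sps := pvPrefixSums stopl
  let lps := pvPrefixSums lngl
  let ups := pvPrefixSums sufl
  let best := (PySem.List.pyRange 0 n 1).foldl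
    (fun st start =>
      (PySem.List.pyRange 1 (min 4 (n - start) + 1) 1).foldl (pvBinner aps sps lps ups start) st)
    (-1, 0, 0)
  let body := PySem.Str.join " " (PySem.List.slice tokens (some best.2.1) (some (best.2.1 + best.2.2)))
  (max best.1 0,
   if body ≠ "" then PySem.Str.strip (PySem.Str.join "" [prefix_, ": ", body]) else "")

-- ===== PRECONDITION & SPEC =====
def Spec_score_name_window_py (tokens : List String) (prefix_ : String) (out : Int × String) : Prop := out = score_name_window_py_alt tokens prefix_
instance (tokens : List String) (prefix_ : String) (out : Int × String) : Decidable (Spec_score_name_window_py tokens prefix_ out) := by unfold Spec_score_name_window_py; infer_instance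

-- ===== CLAIM (what is proved, stated in full; the proofs are below) =====
def Claim_equal_score_name_window_py : Prop := ∀ (tokens : List String) (prefix_ : String), Dom_score_name_window_py tokens prefix_ → Spec_score_name_window_py tokens prefix_ (score_name_window_py tokens prefix_)

-- ===== LEMMAS AND PROOFS =====

-- generic fold-relation lemma
theorem pvFoldlRel {α σ τ : Type} (R : σ → τ → Prop) (f : σ → α → σ) (g : τ → α → τ)
    (l : List α) (s : σ) (t : τ) (h : R s t)
    (hstep : ∀ s t a, a ∈ l → R s t → R (f s a) (g t a)) :
    R (l.foldl f s) (l.foldl g t) := by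
  induction l generalizing s t with
  | nil => exact h
  | cons a l ih =>
      exact ih (f s a) (g t a) (hstep s t a (List.mem_cons_self ..) h)
        (fun s' t' a' ha' => hstep s' t' a' (List.mem_cons_of_mem _ ha'))

theorem pvPrefixSums_aux (xs : List Int) (acc : List Int) (t : Int) :
    xs.foldl (fun (st : List Int × Int) x => (st.1 ++ [st.2 + x], st.2 + x)) (acc, t)
      = (acc ++ (List.range xs.length).map (fun i => t + (xs.take (i + 1)).sum), t + xs.sum) := by
  induction xs generalizing acc t with
  | nil => simp
  | cons x xs ih =>
      simp only [List.foldl_cons, ih]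
      refine Prod.ext ?_ (by simp [add_assoc])
      simp [List.range_succ_eq_map, List.map_map, Function.comp, add_assoc]

theorem pvPrefixSums_eq (xs : List Int) :
    pvPrefixSums xs = (List.range (xs.length + 1)).map (fun i => (xs.take i).sum) := by
  unfold pvPrefixSums
  rw [pvPrefixSums_aux]
  simp [List.range_succ_eq_map, List.map_map, Function.comp]

theorem pvPsGetD (xs : List Int) (k : Nat) (hk : k ≤ xs.length) :
    PySem.List.pyGetD (pvPrefixSums xs) (k : Int) 0 = (xs.take k).sum := by
  rw [pvPrefixSums_eq, PySem.List.pyGetD_natCast]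
  have hlen : k < ((List.range (xs.length + 1)).map (fun i => (xs.take i).sum)).length := by
    simp; omega
  rw [List.getD_eq_getElem _ _ hlen]
  simp

theorem pvTakeSumSub (xs : List Int) (s l : Nat) :
    (xs.take (s + l)).sum - (xs.take s).sum = ((xs.drop s).take l).sum := by
  rw [List.take_add, List.sum_append]; ring

-- the range sum of a mapped feature over a window, via the prefix sums
theorem pvRangeSum (tokens : List String) (f : String → Int) (s l : Nat)
    (h : s + l ≤ tokens.length) :
    PySem.List.pyGetD (pvPrefixSums (tokens.map f)) ((s : Int) + (l : Int)) 0
      - PySem.List.pyGetD (pvPrefixSums (tokens.map f)) (s : Int) 0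
      = (((tokens.drop s).take l).map f).sum := by
  have h1 : ((s : Int) + (l : Int)) = ((s + l : Nat) : Int) := by push_cast; ring
  rw [h1, pvPsGetD _ _ (by simpa using h), pvPsGetD _ _ (by simp; omega), pvTakeSumSub]
  simp [List.map_take, List.map_drop]

-- countP over a join whose separator has no matching char
theorem pvCountPJoin (p : Char → Bool) (sep : List Char) (hsep : sep.countP p = 0)
    (parts : List (List Char)) :
    (PySem.Chars.join sep parts).countP p = (parts.map (fun cs => cs.countP p)).sum := by
  induction parts with
  | nil => simp [PySem.Chars.join_nil]
  | cons a rest ih =>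
      cases rest with
      | nil => simp [PySem.Chars.join_singleton]
      | cons b rest' =>
          rw [PySem.Chars.join_cons_cons]
          simp only [List.countP_append, hsep, List.map_cons, List.sum_cons] at *
          omega

-- the "best window" invariant: A keeps the joined body, B keeps (start, length)
def pvBodyOf (tokens : List String) (bst : Int × Int × Int) : String :=
  PySem.Str.join " " (PySem.List.slice tokens (some bst.2.1) (some (bst.2.1 + bst.2.2)))

theorem pvUpdFst (S : Int) (v : String) (a b : Int) (st : Int × String) (bst : Int × Int × Int)
    (h1 : st.1 = bst.1) :
    (if st.1 < S then (S, v) else st).1 = (if bst.1 < S then (S, a, b) else bst).1 := by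
  rw [h1]
  split
  · rfl
  · exact h1

theorem pvUpdSnd (tokens : List String) (S : Int) (v : String) (a b : Int)
    (st : Int × String) (bst : Int × Int × Int)
    (h1 : st.1 = bst.1) (h2 : st.2 = pvBodyOf tokens bst)
    (hv : v = pvBodyOf tokens (S, a, b)) :
    (if st.1 < S then (S, v) else st).2 = pvBodyOf tokens (if bst.1 < S then (S, a, b) else bst) := by
  rw [h1]
  split
  · exact hv
  · exact h2

-- score computed by A's window rescans equals score computed from B's tables
theorem pvScoreEq (tokens : List String) (start length : Int)
    (hs0 : 0 ≤ start) (hl1 : 1 ≤ length) (hle : start + length ≤ tokens.length)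
    (st : Int × String) (bst : Int × Int × Int)
    (hR1 : st.1 = bst.1) (hR2 : st.2 = pvBodyOf tokens bst) :
    (pvAinner tokens start st length).1
        = (pvBinner (pvPrefixSums (tokens.map (fun t => ((t.toList.countP (fun c => PySem.Chars.isalpha c) : Nat) : Int))))
                    (pvPrefixSums (tokens.map (fun t => if pvStopB.contains (PySem.Str.lower t) then (1 : Int) else 0)))
                    (pvPrefixSums (tokens.map (fun t => if 6 ≤ PySem.Str.len t then (1 : Int) else 0)))
                    (pvPrefixSums (tokens.map (fun t => if pvSufB.contains (PySem.Str.upper t) then (1 : Int) else 0)))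
                    start bst length).1
      ∧ (pvAinner tokens start st length).2
        = pvBodyOf tokens
            (pvBinner (pvPrefixSums (tokens.map (fun t => ((t.toList.countP (fun c => PySem.Chars.isalpha c) : Nat) : Int))))
                    (pvPrefixSums (tokens.map (fun t => if pvStopB.contains (PySem.Str.lower t) then (1 : Int) else 0)))
                    (pvPrefixSums (tokens.map (fun t => if 6 ≤ PySem.Str.len t then (1 : Int) else 0)))
                    (pvPrefixSums (tokens.map (fun t => if pvSufB.contains (PySem.Str.upper t) then (1 : Int) else 0)))
                    start bst length) := by
  have hl0 : (0:Int) ≤ length := by omega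
  set s : Nat := start.toNat with hs
  set l : Nat := length.toNat with hl
  have hstart : start = (s : Int) := by omega
  have hlength : length = (l : Int) := by omega
  have hsl : s + l ≤ tokens.length := by omega
  have hwin : PySem.List.slice tokens (some start) (some (start + length))
      = (tokens.drop s).take l := by
    rw [PySem.List.slice_toNat tokens hs0 (by omega)]
    congr 1
    omega
  set W : List String := (tokens.drop s).take l with hW
  have hWlen : W.length = l := by
    simp [hW]
    omega
  have hlenW : PySem.List.len W = length := by
    rw [PySem.List.len_eq, hWlen, hlength]
  have halpha : ((PySem.Str.join " " W).toList.countP (fun c => PySem.Chars.isalpha c) : Int)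
      = (W.map (fun t => ((t.toList.countP (fun c => PySem.Chars.isalpha c) : Nat) : Int))).sum := by
    rw [PySem.Str.toList_join, pvCountPJoin _ _ (by decide), List.map_map]
    rw [Nat.cast_list_sum, List.map_map]
    rfl
  have hA : PySem.List.pyGetD (pvPrefixSums (tokens.map (fun t => ((t.toList.countP (fun c => PySem.Chars.isalpha c) : Nat) : Int)))) (start + length) 0
      - PySem.List.pyGetD (pvPrefixSums (tokens.map (fun t => ((t.toList.countP (fun c => PySem.Chars.isalpha c) : Nat) : Int)))) start 0
      = ((PySem.Str.join " " W).toList.countP (fun c => PySem.Chars.isalpha c) : Int) := by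
    rw [halpha, hstart, hlength, pvRangeSum tokens _ s l hsl]
  have hS : PySem.List.pyGetD (pvPrefixSums (tokens.map (fun t => if pvStopB.contains (PySem.Str.lower t) then (1 : Int) else 0))) (start + length) 0
      - PySem.List.pyGetD (pvPrefixSums (tokens.map (fun t => if pvStopB.contains (PySem.Str.lower t) then (1 : Int) else 0))) start 0
      = (W.countP (fun t => pvStopA.contains (PySem.Str.lower t)) : Nat) := by
    rw [hstart, hlength, pvRangeSum tokens _ s l hsl]
    rw [← hW, PySem.List.sum_map_ite_one_zero]
    rfl
  have hL : PySem.List.pyGetD (pvPrefixSums (tokens.map (fun t => if 6 ≤ PySem.Str.len t then (1 : Int) else 0))) (start + length) 0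
      - PySem.List.pyGetD (pvPrefixSums (tokens.map (fun t => if 6 ≤ PySem.Str.len t then (1 : Int) else 0))) start 0
      = (W.countP (fun t => decide (6 ≤ PySem.Str.len t)) : Nat) := by
    rw [hstart, hlength, pvRangeSum tokens _ s l hsl, ← hW]
    rw [← PySem.List.sum_map_ite_one_zero (fun t => decide (6 ≤ PySem.Str.len t)) W]
    simp
  have hLiff : (W.any (fun t => decide (6 ≤ PySem.Str.len t)) = true)
      ↔ (0 < ((W.countP (fun t => decide (6 ≤ PySem.Str.len t)) : Nat) : Int)) := by
    rw [List.any_eq_true, Int.natCast_pos, List.countP_pos_iff]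
  have hU : PySem.List.pyGetD (pvPrefixSums (tokens.map (fun t => if pvSufB.contains (PySem.Str.upper t) then (1 : Int) else 0))) (start + length) 0
      - PySem.List.pyGetD (pvPrefixSums (tokens.map (fun t => if pvSufB.contains (PySem.Str.upper t) then (1 : Int) else 0))) start 0
      = (W.countP (fun t => pvSufA.contains (PySem.Str.upper t)) : Nat) := by
    rw [hstart, hlength, pvRangeSum tokens _ s l hsl, ← hW]
    rw [PySem.List.sum_map_ite_one_zero]
    rfl
  have hUiff : (W.any (fun t => pvSufA.contains (PySem.Str.upper t)) = true)
      ↔ (0 < ((W.countP (fun t => pvSufA.contains (PySem.Str.upper t)) : Nat) : Int)) := by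
    rw [List.any_eq_true, Int.natCast_pos, List.countP_pos_iff]
  have hC1 : (1 ≤ length ∧ length ≤ 3) ↔ (length ≤ 3) := by omega
  rw [pvAinner, pvBinner]
  simp only [hwin, hA, hS, hU, hL, hlenW, hC1, hLiff, hUiff]
  refine ⟨pvUpdFst _ _ _ _ _ _ hR1, pvUpdSnd tokens _ _ _ _ _ _ hR1 hR2 ?_⟩
  simp only [pvBodyOf, hwin]

-- ===== VERDICT (by name: the statement is the Claim_ definition above) =====
theorem score_name_window_py_spec : Claim_equal_score_name_window_py := by
  intro tokens prefix_ _
  unfold Spec_score_name_window_py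
  simp only [score_name_window_py, score_name_window_py_alt]
  have hfold := pvFoldlRel
    (fun (st : Int × String) (bst : Int × Int × Int) => st.1 = bst.1 ∧ st.2 = pvBodyOf tokens bst)
    (pvAouter tokens)
    (fun st start =>
      (PySem.List.pyRange 1 (min 4 (PySem.List.len tokens - start) + 1) 1).foldl
        (pvBinner (pvPrefixSums (tokens.map (fun t => ((t.toList.countP (fun c => PySem.Chars.isalpha c) : Nat) : Int))))
                  (pvPrefixSums (tokens.map (fun t => if pvStopB.contains (PySem.Str.lower t) then (1 : Int) else 0)))
                  (pvPrefixSums (tokens.map (fun t => if 6 ≤ PySem.Str.len t then (1 : Int) else 0)))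
                  (pvPrefixSums (tokens.map (fun t => if pvSufB.contains (PySem.Str.upper t) then (1 : Int) else 0)))
                  start) st)
    (PySem.List.pyRange 0 (PySem.List.len tokens) 1) (-1, "") (-1, 0, 0)
    ⟨rfl, by
      show ("" : String) = pvBodyOf tokens (-1, 0, 0)
      simp only [pvBodyOf]
      have hsl0 : PySem.List.slice tokens (some 0) (some (0 + 0)) = [] := by
        rw [PySem.List.slice_toNat tokens (by omega) (by omega)]
        simp
      rw [hsl0]
      decide⟩
    (by
      intro st bst a ha hR
      obtain ⟨ha0, halt⟩ := PySem.List.mem_pyRange_one.mp ha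
      rw [pvAouter]
      exact pvFoldlRel
        (fun (st : Int × String) (bst : Int × Int × Int) => st.1 = bst.1 ∧ st.2 = pvBodyOf tokens bst)
        (pvAinner tokens a)
        (pvBinner (pvPrefixSums (tokens.map (fun t => ((t.toList.countP (fun c => PySem.Chars.isalpha c) : Nat) : Int))))
                  (pvPrefixSums (tokens.map (fun t => if pvStopB.contains (PySem.Str.lower t) then (1 : Int) else 0)))
                  (pvPrefixSums (tokens.map (fun t => if 6 ≤ PySem.Str.len t then (1 : Int) else 0)))
                  (pvPrefixSums (tokens.map (fun t => if pvSufB.contains (PySem.Str.upper t) then (1 : Int) else 0)))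
                  a)
        (PySem.List.pyRange 1 (min 4 (PySem.List.len tokens - a) + 1) 1)
        st bst hR (by
        intro st' bst' length hlen hR'
        obtain ⟨hl1, hlub⟩ := PySem.List.mem_pyRange_one.mp hlen
        have hle : a + length ≤ (tokens.length : Int) := by
          rw [PySem.List.len_eq] at hlub
          omega
        exact pvScoreEq tokens a length ha0 hl1 hle st' bst' hR'.1 hR'.2))
  obtain ⟨h1, h2⟩ := hfold
  rw [h1, h2, pvBodyOf]
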